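-- pv_equiv track=rewrite | github.com/scifo04/IF2124_Tubes_TBFO | read.py | convert_to_slash
-- ===== SOURCE A (Python) =====
-- def convert_to_slash(string):
--     newstring = ''
--     for i in range (len(string)):
--         if (i == 1):
--             newstring = newstring + '/'
--             newstring = newstring + string[i]
--         else:
--             newstring = newstring + string[i]
--     return newstring
-- ===== SOURCE B (Python) =====
-- def convert_to_slash(string):
--     if len(string) < 2:
--         return string
--     return string[0] + '/' + string[1:]
-- ===== Notes on version B (the rewrite author's own statement) =====
-- stated objective: simpler
-- what changed: Replaces the index loop that appends one character at a time (with a special branch at index 1) by a closed-form slice expression (first char, a slash, the rest), guarded by len<2 so short strings are returned unchanged.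
import Mathlib
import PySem

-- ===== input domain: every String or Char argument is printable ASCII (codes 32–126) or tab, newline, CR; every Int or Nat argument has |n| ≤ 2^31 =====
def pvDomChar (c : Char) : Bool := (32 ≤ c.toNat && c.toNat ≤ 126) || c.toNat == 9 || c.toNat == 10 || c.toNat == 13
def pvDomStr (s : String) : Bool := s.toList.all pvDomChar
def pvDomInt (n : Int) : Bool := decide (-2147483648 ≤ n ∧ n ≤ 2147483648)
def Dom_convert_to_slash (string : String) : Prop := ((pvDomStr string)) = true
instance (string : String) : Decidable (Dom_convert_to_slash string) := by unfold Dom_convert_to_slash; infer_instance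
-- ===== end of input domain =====

-- B replaces A's per-character index loop (special branch at i==1) by a closed-form
-- slice expression: simpler, same return value on every input.

-- ===== PORT A =====
-- A: for i in range(len(string)): append '/'+string[i] when i==1, else string[i].
-- string indexing is in range for every i of range(len), so getD never uses its default.
def convert_to_slash (string : String) : String :=
  let cs := string.toList
  String.ofList ((List.range cs.length).foldl
    (fun acc i => if i = 1 then (acc ++ ['/']) ++ [cs.getD i ' '] else acc ++ [cs.getD i ' ']) [])

-- ===== PORT B =====
-- B: if len(string) < 2: return string; else string[0] + '/' + string[1:]
def convert_to_slash_alt (string : String) : String :=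
  let cs := string.toList
  if cs.length < 2 then string
  else String.ofList ([cs.getD 0 ' '] ++ ['/'] ++ cs.drop 1)

-- ===== PRECONDITION & SPEC =====
def Spec_convert_to_slash (string : String) (out : String) : Prop := out = convert_to_slash_alt string
instance (string : String) (out : String) : Decidable (Spec_convert_to_slash string out) := by unfold Spec_convert_to_slash; infer_instance

-- ===== CLAIM (what is proved, stated in full; the proofs are below) =====
def Claim_equal_convert_to_slash : Prop := ∀ (string : String), Dom_convert_to_slash string → Spec_convert_to_slash string (convert_to_slash string)

-- ===== LEMMAS AND PROOFS =====

-- For indices ≥ 2 the branch i = 1 is never taken: the fold just appends the remaining chars.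
theorem cts_tail (cs : List Char) (t : List Char) (k : Nat) (hk : 2 ≤ k)
    (ht : ∀ j, j < t.length → cs.getD (k + j) ' ' = t.getD j ' ') (acc : List Char) :
    (List.range' k t.length).foldl
      (fun acc i => if i = 1 then (acc ++ ['/']) ++ [cs.getD i ' '] else acc ++ [cs.getD i ' ']) acc
    = acc ++ t := by
  induction t generalizing k acc with
  | nil => simp
  | cons a t ih =>
    have h0 := ht 0 (by simp)
    simp only [List.length_cons, List.range'_succ, List.foldl_cons]
    rw [if_neg (by omega)]
    have := ih (k + 1) (by omega) (fun j hj => by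
      have := ht (j + 1) (by simpa using Nat.succ_lt_succ hj)
      simpa [Nat.add_assoc, Nat.add_comm 1 j] using this) (acc ++ [cs.getD k ' '])
    rw [this]
    simp at h0
    simp [h0]


theorem cts_list (cs : List Char) :
    (List.range cs.length).foldl
      (fun acc i => if i = 1 then (acc ++ ['/']) ++ [cs.getD i ' '] else acc ++ [cs.getD i ' ']) []
    = (if cs.length < 2 then cs else [cs.getD 0 ' '] ++ ['/'] ++ cs.drop 1) := by
  match cs with
  | [] => simp
  | [a] =>
    have h1 : List.range 1 = [0] := by decide
    simp [h1]
  | a :: b :: t =>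
    rw [if_neg (by simp)]
    have hr : List.range (a :: b :: t).length = 0 :: 1 :: List.range' 2 t.length := by
      rw [List.range_eq_range']
      simp [List.range'_succ]
    rw [hr]
    simp only [List.foldl_cons]
    norm_num
    have := cts_tail (a :: b :: t) t 2 (le_refl 2)
      (fun j hj => by
        simp only [List.getD]
        rw [show 2 + j = j + 2 by omega]
        simp)
      ([(a::b::t).getD 0 ' '] ++ ['/'] ++ [(a::b::t).getD 1 ' '])
    simp only [List.append_assoc] at this ⊢
    simp [List.getD] at this ⊢
    exact this

-- ===== VERDICT (by name: the statement is the Claim_ definition above) =====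
theorem convert_to_slash_spec : Claim_equal_convert_to_slash := by
  intro s _
  unfold Spec_convert_to_slash convert_to_slash convert_to_slash_alt
  simp only []
  rw [cts_list]
  split
  · exact String.ofList_toList
  · rfl
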